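-- pv_equiv track=rewrite | github.com/xiaer1/treesql_sparc | preprocess/data_process_sparc.py | judge_is_exists_digit
-- ===== SOURCE A (Python) =====
-- def judge_is_exists_digit(question_toks, tag_list):
--     super_list = []
--     digit_list = []
--     # en_digit_list = []
--
--     for i, (tok, tag) in enumerate(zip(question_toks, tag_list)):
--         if tag == 'JJS' or tag == 'RBS' or \
--                 tok.endswith('est') or tok == 'most' or tok == 'least': # and (tag == 'JJ' or tag == 'RB')
--             super_list.append(i)
--         if tok.isdigit():
--             digit_list.append(i)
--         # if tok in en_digit.keys():
--         #     en_digit_list.append(i)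
--
--     if super_list!=[] and digit_list!=[]:
--         try: # assert len(digit_list) == 1
--             for x in super_list:
--                 for y in digit_list:
--                     if abs(x - y) == 1:
--                         return True
--         except Exception as e:
--             return False
--     return False
-- ===== SOURCE B (Python) =====
-- def judge_is_exists_digit(question_toks, tag_list):
--     flags = [(tag in ('JJS', 'RBS') or tok.endswith('est') or tok in ('most', 'least'),
--               tok.isdigit())
--              for tok, tag in zip(question_toks, tag_list)]
--     for (s1, d1), (s2, d2) in zip(flags, flags[1:]):
--         if (s1 and d2) or (d1 and s2):
--             return True
--     return False
-- ===== Notes on version B (the rewrite author's own statement) =====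
-- stated objective: simpler
-- what changed: Replaced A's collect-two-index-lists-then-nested-pairwise |x-y|==1 scan (with guard and dead try/except) by one pass building (is_super, is_digit) flags and a single adjacent-pair scan.
import Mathlib
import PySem

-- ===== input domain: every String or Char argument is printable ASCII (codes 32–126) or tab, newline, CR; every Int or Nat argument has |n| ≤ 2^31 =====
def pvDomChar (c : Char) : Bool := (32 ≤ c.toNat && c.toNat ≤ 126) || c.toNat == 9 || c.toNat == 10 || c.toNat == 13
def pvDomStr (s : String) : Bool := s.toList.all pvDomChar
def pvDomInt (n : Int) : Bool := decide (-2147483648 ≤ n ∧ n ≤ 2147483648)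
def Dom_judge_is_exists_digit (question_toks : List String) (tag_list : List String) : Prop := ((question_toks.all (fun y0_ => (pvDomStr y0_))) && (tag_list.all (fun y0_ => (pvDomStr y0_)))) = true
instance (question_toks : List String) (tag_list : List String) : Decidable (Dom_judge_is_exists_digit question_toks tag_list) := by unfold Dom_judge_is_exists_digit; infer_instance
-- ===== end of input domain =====

-- B replaces A's two collected index lists and nested pairwise |x-y|==1 scan by one flags
-- pass and a single adjacent-pair scan (objective: simpler, one pass instead of a nested scan).

-- ===== PORT A =====
-- literal transliteration: one loop over enumerate(zip(..)) collecting the two index lists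
-- (pvStepA is that loop body), then the guarded nested pairwise scan (the try/except cannot
-- fire: its body raises nothing).
def pvStepA (acc : List Int × List Int) (p : Int × (String × String)) : List Int × List Int :=
  let acc1 := if p.2.2 == "JJS" || p.2.2 == "RBS" || PySem.Str.endswith p.2.1 "est"
                  || p.2.1 == "most" || p.2.1 == "least"
              then (acc.1 ++ [p.1], acc.2) else acc
  if PySem.Str.strIsdigit p.2.1 then (acc1.1, acc1.2 ++ [p.1]) else acc1

def judge_is_exists_digit (question_toks : List String) (tag_list : List String) : Bool :=
  let lists : List Int × List Int :=
    (PySem.List.enumerate (question_toks.zip tag_list) 0).foldl pvStepA ([], [])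
  if lists.1 ≠ [] ∧ lists.2 ≠ [] then
    lists.1.any (fun x => lists.2.any (fun y => (x - y).natAbs == 1))
  else false

-- ===== PORT B =====
def pvIsSuperB (tok tag : String) : Bool :=
  (tag == "JJS" || tag == "RBS") || PySem.Str.endswith tok "est" || (tok == "most" || tok == "least")

-- the 'for … in zip(flags, flags[1:])' loop of Source B
def pvAdjScan : List (Bool × Bool) → Bool
  | (s1, d1) :: (s2, d2) :: rest =>
      if (s1 && d2) || (d1 && s2) then true else pvAdjScan ((s2, d2) :: rest)
  | _ => false

def judge_is_exists_digit_alt (question_toks : List String) (tag_list : List String) : Bool :=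
  pvAdjScan ((question_toks.zip tag_list).map
    (fun p => (pvIsSuperB p.1 p.2, PySem.Str.strIsdigit p.1)))

-- ===== PRECONDITION & SPEC =====
def Spec_judge_is_exists_digit (question_toks : List String) (tag_list : List String) (out : Bool) : Prop := out = judge_is_exists_digit_alt question_toks tag_list
instance (question_toks : List String) (tag_list : List String) (out : Bool) : Decidable (Spec_judge_is_exists_digit question_toks tag_list out) := by unfold Spec_judge_is_exists_digit; infer_instance

-- ===== CLAIM (what is proved, stated in full; the proofs are below) =====
def Claim_equal_judge_is_exists_digit : Prop := ∀ (question_toks : List String) (tag_list : List String), Dom_judge_is_exists_digit question_toks tag_list → Spec_judge_is_exists_digit question_toks tag_list (judge_is_exists_digit question_toks tag_list)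

-- ===== LEMMAS AND PROOFS =====

-- proof-side index collector: positions (from s) whose entry satisfies f
def pvIdxs (f : String × String → Bool) : List (String × String) → Int → List Int
  | [], _ => []
  | x :: xs, s => (if f x then [s] else []) ++ pvIdxs f xs (s + 1)

def pvSup (p : String × String) : Bool :=
  p.2 == "JJS" || p.2 == "RBS" || PySem.Str.endswith p.1 "est" || p.1 == "most" || p.1 == "least"

def pvDig (p : String × String) : Bool := PySem.Str.strIsdigit p.1

lemma pvStepA_eq (a b : List Int) (q : Int × (String × String)) :
    pvStepA (a, b) q
      = (a ++ (if pvSup q.2 then [q.1] else []), b ++ (if pvDig q.2 then [q.1] else [])) := by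
  unfold pvStepA pvSup pvDig
  split_ifs <;> simp_all

lemma pvFold_eq (L : List (String × String)) :
    ∀ (s : Int) (a b : List Int),
    (PySem.List.enumerate L s).foldl pvStepA (a, b)
      = (a ++ pvIdxs pvSup L s, b ++ pvIdxs pvDig L s) := by
  induction L with
  | nil => intro s a b; simp [pvIdxs, PySem.List.enumerate_nil]
  | cons x xs ih =>
    intro s a b
    rw [PySem.List.enumerate_cons, List.foldl_cons, pvStepA_eq, ih]
    by_cases hs : pvSup x <;> by_cases hd : pvDig x <;> simp [pvIdxs, hs, hd]

lemma mem_pvIdxs (f : String × String → Bool) (L : List (String × String)) :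
    ∀ (s x : Int),
    x ∈ pvIdxs f L s ↔ ∃ (k : Nat), ∃ (h : k < L.length), x = s + k ∧ f L[k] = true := by
  induction L with
  | nil => intro s x; simp [pvIdxs]
  | cons y ys ih =>
    intro s x
    simp only [pvIdxs, List.mem_append, ih]
    constructor
    · rintro (hx | ⟨k, hk, rfl, hf⟩)
      · by_cases hf : f y = true
        · simp only [hf, if_true, List.mem_singleton] at hx
          exact ⟨0, by simp, by simp [hx], by simpa using hf⟩
        · simp [hf] at hx
      · exact ⟨k + 1, by simpa using Nat.succ_lt_succ hk, by push_cast; ring, by simpa using hf⟩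
    · rintro ⟨k, hk, rfl, hf⟩
      cases k with
      | zero => left; simp only [List.getElem_cons_zero] at hf; simp [hf]
      | succ k =>
        right
        exact ⟨k, by simpa using Nat.lt_of_succ_lt_succ hk, by push_cast; ring,
               by simpa using hf⟩

-- adjacency predicate both sides are proved equivalent to
def pvAdj (L : List (String × String)) : Prop :=
  ∃ (k : Nat), ∃ (h : k + 1 < L.length),
    (pvSup L[k] = true ∧ pvDig L[k + 1] = true) ∨
    (pvDig L[k] = true ∧ pvSup L[k + 1] = true)

lemma pvAdjScan_iff (fl : List (Bool × Bool)) :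
    pvAdjScan fl = true ↔
      ∃ (k : Nat), ∃ (h : k + 1 < fl.length),
        ((fl[k].1 && fl[k + 1].2) || (fl[k].2 && fl[k + 1].1)) = true := by
  induction fl with
  | nil => simp [pvAdjScan]
  | cons x xs ih =>
    cases xs with
    | nil =>
      simp only [pvAdjScan]
      constructor
      · rintro ⟨⟩
      · rintro ⟨k, hk, _⟩; simp at hk
    | cons y ys =>
      obtain ⟨x1, x2⟩ := x; obtain ⟨y1, y2⟩ := y
      simp only [pvAdjScan]
      split
      · rename_i hcond
        constructor
        · intro _; exact ⟨0, by simp, by simpa using hcond⟩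
        · intro _; rfl
      · rename_i hcond
        rw [ih]
        constructor
        · rintro ⟨k, hk, hc⟩
          exact ⟨k + 1, by simpa using Nat.succ_lt_succ hk, by simpa using hc⟩
        · rintro ⟨k, hk, hc⟩
          cases k with
          | zero => exact absurd (by simpa using hc) hcond
          | succ k =>
            exact ⟨k, by simpa using Nat.lt_of_succ_lt_succ hk, by simpa using hc⟩

lemma alt_iff (question_toks tag_list : List String) :
    judge_is_exists_digit_alt question_toks tag_list = true ↔
      pvAdj (question_toks.zip tag_list) := by
  unfold judge_is_exists_digit_alt pvAdj
  rw [pvAdjScan_iff]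
  constructor
  · rintro ⟨k, hk, hc⟩
    simp only [List.length_map] at hk
    refine ⟨k, hk, ?_⟩
    simp only [List.getElem_map] at hc
    have : (pvIsSuperB ((question_toks.zip tag_list)[k]).1 ((question_toks.zip tag_list)[k]).2 &&
        PySem.Str.strIsdigit ((question_toks.zip tag_list)[k+1]).1 ||
        (PySem.Str.strIsdigit ((question_toks.zip tag_list)[k]).1 &&
        pvIsSuperB ((question_toks.zip tag_list)[k+1]).1 ((question_toks.zip tag_list)[k+1]).2)) = true := hc
    simp only [Bool.or_eq_true, Bool.and_eq_true] at this
    rcases this with ⟨h1, h2⟩ | ⟨h1, h2⟩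
    · exact Or.inl ⟨by simp [pvSup, pvIsSuperB] at h1 ⊢; tauto, h2⟩
    · exact Or.inr ⟨h1, by simp [pvSup, pvIsSuperB] at h2 ⊢; tauto⟩
  · rintro ⟨k, hk, hc⟩
    refine ⟨k, by simpa using hk, ?_⟩
    simp only [List.getElem_map]
    simp only [Bool.or_eq_true, Bool.and_eq_true]
    rcases hc with ⟨h1, h2⟩ | ⟨h1, h2⟩
    · exact Or.inl ⟨by simp [pvSup, pvIsSuperB] at h1 ⊢; tauto, h2⟩
    · exact Or.inr ⟨h1, by simp [pvSup, pvIsSuperB] at h2 ⊢; tauto⟩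

lemma a_iff (question_toks tag_list : List String) :
    judge_is_exists_digit question_toks tag_list = true ↔
      pvAdj (question_toks.zip tag_list) := by
  set L := question_toks.zip tag_list with hL
  unfold judge_is_exists_digit
  rw [← hL]
  rw [pvFold_eq L 0 [] []]
  simp only [List.nil_append]
  constructor
  · intro h
    split at h
    · simp only [List.any_eq_true] at h
      obtain ⟨x, hx, y, hy, hxy⟩ := h
      rw [mem_pvIdxs] at hx hy
      obtain ⟨k1, hk1, rfl, hf1⟩ := hx
      obtain ⟨k2, hk2, hy2, hf2⟩ := hy
      simp only [zero_add] at hy2 ⊢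
      subst hy2
      have habs : ((k1 : Int) - (k2 : Int)).natAbs = 1 := by simpa using hxy
      have : k2 = k1 + 1 ∨ k1 = k2 + 1 := by omega
      rcases this with rfl | rfl
      · exact ⟨k1, by omega, Or.inl ⟨hf1, hf2⟩⟩
      · exact ⟨k2, by omega, Or.inr ⟨hf2, hf1⟩⟩
    · exact absurd h (by simp)
  · rintro ⟨k, hk, hc⟩
    have h1 : k < L.length := by omega
    have h2 : k + 1 < L.length := hk
    have mem : ∀ (f : String × String → Bool) (j : Nat) (hj : j < L.length),
        f L[j] = true → (j : Int) ∈ pvIdxs f L 0 := by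
      intro f j hj hf
      rw [mem_pvIdxs]
      exact ⟨j, hj, by omega, hf⟩
    rcases hc with ⟨hs, hd⟩ | ⟨hd, hs⟩
    · have hms := mem pvSup k h1 hs
      have hmd := mem pvDig (k + 1) h2 hd
      rw [if_pos ⟨by intro h; simp [h] at hms, by intro h; simp [h] at hmd⟩]
      simp only [List.any_eq_true]
      exact ⟨k, hms, (k + 1 : Nat), hmd, by simp only [beq_iff_eq]; omega⟩
    · have hms := mem pvSup (k + 1) h2 hs
      have hmd := mem pvDig k h1 hd
      rw [if_pos ⟨by intro h; simp [h] at hms, by intro h; simp [h] at hmd⟩]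
      simp only [List.any_eq_true]
      exact ⟨(k + 1 : Nat), hms, k, hmd, by simp only [beq_iff_eq]; omega⟩

-- ===== VERDICT (by name: the statement is the Claim_ definition above) =====
theorem judge_is_exists_digit_spec : Claim_equal_judge_is_exists_digit := by
  intro question_toks tag_list _
  unfold Spec_judge_is_exists_digit
  have ha := a_iff question_toks tag_list
  have hb := alt_iff question_toks tag_list
  cases h1 : judge_is_exists_digit question_toks tag_list <;>
  cases h2 : judge_is_exists_digit_alt question_toks tag_list <;>
    simp_all
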